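-- pv_equiv track=rewrite | github.com/Sangdak/BeautyCityBot | beautycity/beauty_city_bot.py | get_masters_hours
-- ===== SOURCE A (Python) =====
-- def get_masters_hours(masters, schedule):
--     for master in masters:
--         for day, hours in schedule.items():
--             lst = []
--             for hour in hours:
--                 if master in schedule[day][hour]:
--                     lst.append(hour)
--                     masters[master][day] = lst
--     return masters
-- ===== SOURCE B (Python) =====
-- def get_masters_hours(masters, schedule):
--     # One pass over the schedule cells: bucket, per day, each occupied master's hours.
--     buckets = []
--     for day, hours in schedule.items():
--         byday = {}
--         for hour, cell in hours.items():
--             for m in dict.fromkeys(cell):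
--                 byday.setdefault(m, []).append(hour)
--         buckets.append((day, byday))
--     # Rebuild the masters mapping, adding each master's occupied days.
--     result = {}
--     for m, inner in masters.items():
--         new_inner = dict(inner)
--         for day, byday in buckets:
--             if m in byday:
--                 new_inner[day] = byday[m]
--         result[m] = new_inner
--     return result
-- ===== Notes on version B (the rewrite author's own statement) =====
-- stated objective: faster
-- what changed: Inverts A's master-by-master rescans of the whole schedule into one pass over the schedule cells that buckets each listed master's hours per day, then merges the buckets into each master's row; B builds a fresh dict instead of mutating `masters` in place (the return value is identical).
import Mathlib
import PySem

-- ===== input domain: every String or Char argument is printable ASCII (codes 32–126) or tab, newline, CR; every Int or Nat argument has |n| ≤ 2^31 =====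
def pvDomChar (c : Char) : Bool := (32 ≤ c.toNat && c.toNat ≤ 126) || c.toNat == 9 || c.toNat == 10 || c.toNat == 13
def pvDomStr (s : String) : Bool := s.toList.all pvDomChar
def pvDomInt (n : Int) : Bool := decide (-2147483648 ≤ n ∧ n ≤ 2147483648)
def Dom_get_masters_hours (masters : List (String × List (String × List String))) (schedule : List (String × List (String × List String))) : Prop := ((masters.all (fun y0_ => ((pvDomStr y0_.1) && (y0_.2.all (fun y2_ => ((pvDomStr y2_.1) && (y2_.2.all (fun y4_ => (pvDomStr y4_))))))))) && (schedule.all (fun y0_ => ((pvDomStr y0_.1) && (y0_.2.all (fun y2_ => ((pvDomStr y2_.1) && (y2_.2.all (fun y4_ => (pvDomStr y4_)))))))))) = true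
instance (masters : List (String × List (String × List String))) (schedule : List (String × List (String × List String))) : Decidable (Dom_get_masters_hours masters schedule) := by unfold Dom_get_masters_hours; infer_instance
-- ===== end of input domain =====

-- B replaces A's master×day×hour lookup loops by one pass over the schedule cells (objective: faster).
-- Python A mutates `masters` in place and returns it; B builds a fresh dict — the equivalence proved here is about the RETURN value only.

-- ===== PORT A =====
-- A, literally: for each master, for each day, scan every hour slot and look the cell up
-- through schedule[day][hour]; append matching hours and assign masters[master][day] = lst.
def pvMd0 (masters : List (String × List (String × List String))) :
    PySem.Dict String (PySem.Dict String (List String)) :=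
  PySem.Dict.mk (masters.map (fun p => (p.1, PySem.Dict.mk p.2)))

def pvSd (schedule : List (String × List (String × List String))) :
    PySem.Dict String (PySem.Dict String (List String)) :=
  PySem.Dict.mk (schedule.map (fun p => (p.1, PySem.Dict.mk p.2)))

def get_masters_hours (masters : List (String × List (String × List String))) (schedule : List (String × List (String × List String))) : List (String × List (String × List String)) :=
  ((pvMd0 masters).keys.foldl (fun md master =>
      (pvSd schedule).items.foldl (fun md dh =>
        (dh.2.items.foldl
          (fun (st : List String × PySem.Dict String (PySem.Dict String (List String))) hc =>
            if master ∈ (((pvSd schedule).getD dh.1 PySem.Dict.empty).getD hc.1 []) then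
              (st.1 ++ [hc.1],
               st.2.modify master PySem.Dict.empty
                 (fun inner => inner.insert dh.1 (st.1 ++ [hc.1])))
            else st)
          ([], md)).2)
        md)
      (pvMd0 masters)).items.map (fun p => (p.1, p.2.items))

-- ===== PORT B =====
-- B: one pass over the schedule cells buckets, per day, each listed master's hours;
-- then each master's row is rebuilt by merging its buckets.
def pvBuckets (schedule : List (String × List (String × List String))) :
    List (String × PySem.Dict String (List String)) :=
  schedule.map (fun p =>
    (p.1, p.2.foldl (fun bd hc =>
            (PySem.List.dedup hc.2).foldl
              (fun bd m => bd.insert m (bd.getD m [] ++ [hc.1])) bd)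
          PySem.Dict.empty))

def pvNewInner (buckets : List (String × PySem.Dict String (List String))) (m : String)
    (inner : List (String × List String)) : PySem.Dict String (List String) :=
  buckets.foldl (fun inn db =>
    if db.2.contains m then inn.insert db.1 (db.2.getD m []) else inn) (PySem.Dict.mk inner)

def get_masters_hours_alt (masters : List (String × List (String × List String))) (schedule : List (String × List (String × List String))) : List (String × List (String × List String)) :=
  (masters.foldl (fun res p => res.insert p.1 (pvNewInner (pvBuckets schedule) p.1 p.2).items)
    (PySem.Dict.empty : PySem.Dict String (List (String × List String)))).items

-- ===== PRECONDITION & SPEC =====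
-- Pre_ excludes association lists with duplicate keys in `masters` or in `schedule` (outer or
-- per-day): such lists do not represent any Python dict input, so A is never run on them.
def Pre_get_masters_hours (masters : List (String × List (String × List String))) (schedule : List (String × List (String × List String))) : Prop :=
  (masters.map Prod.fst).Nodup ∧ (schedule.map Prod.fst).Nodup ∧
  (∀ p ∈ schedule, (p.2.map Prod.fst).Nodup)
instance (masters : List (String × List (String × List String))) (schedule : List (String × List (String × List String))) : Decidable (Pre_get_masters_hours masters schedule) := by unfold Pre_get_masters_hours; infer_instance

def pvWitness_get_masters_hours : (List (String × List (String × List String))) × (List (String × List (String × List String))) :=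
  ([("anna", [("mon", ["9"])]), ("bob", [])],
   [("mon", [("9", ["bob"]), ("10", ["anna", "bob"])]), ("tue", [("9", ["anna"])])])

def Spec_get_masters_hours (masters : List (String × List (String × List String))) (schedule : List (String × List (String × List String))) (out : List (String × List (String × List String))) : Prop := out = get_masters_hours_alt masters schedule
instance (masters : List (String × List (String × List String))) (schedule : List (String × List (String × List String))) (out : List (String × List (String × List String))) : Decidable (Spec_get_masters_hours masters schedule out) := by unfold Spec_get_masters_hours; infer_instance

-- ===== CLAIM (what is proved, stated in full; the proofs are below) =====
def Claim_equal_get_masters_hours : Prop := ∀ (masters : List (String × List (String × List String))) (schedule : List (String × List (String × List String))), Dom_get_masters_hours masters schedule → Pre_get_masters_hours masters schedule → Spec_get_masters_hours masters schedule (get_masters_hours masters schedule)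

-- ===== LEMMAS AND PROOFS =====

-- the hours (slot keys) of one day on which master m is listed, in slot order
def pvFilt (m : String) (hours : List (String × List String)) : List String :=
  (hours.filter (fun hc => decide (m ∈ hc.2))).map Prod.fst

-- the canonical per-master update both programs compute
def pvPerMaster (schedule : List (String × List (String × List String))) (m : String)
    (inner : PySem.Dict String (List String)) : PySem.Dict String (List String) :=
  schedule.foldl
    (fun inn p => if pvFilt m p.2 = [] then inn else inn.insert p.1 (pvFilt m p.2)) inner

theorem pvFilt_cons (m : String) (hc : String × List String) (t : List (String × List String)) :
    pvFilt m (hc :: t) = (if m ∈ hc.2 then [hc.1] else []) ++ pvFilt m t := by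
  by_cases h : m ∈ hc.2 <;> simp [pvFilt, h]

-- ---- B side ----

theorem cell_getD (hour m : String) :
    ∀ (l : List String) (bd : PySem.Dict String (List String)), l.Nodup →
      ((l.foldl (fun bd m' => bd.insert m' (bd.getD m' [] ++ [hour])) bd).getD m [])
        = bd.getD m [] ++ (if m ∈ l then [hour] else []) := by
  intro l
  induction l with
  | nil => intro bd _; simp
  | cons a t ih =>
    intro bd hnd
    rcases List.nodup_cons.mp hnd with ⟨ha, ht⟩
    by_cases hma : m = a
    · subst hma
      simp only [List.foldl_cons, ih _ ht, PySem.Dict.getD_insert_self]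
      simp [ha]
    · simp only [List.foldl_cons, ih _ ht, PySem.Dict.getD_insert_of_ne _ _ _ hma]
      simp [List.mem_cons, hma]

theorem cell_contains (hour m : String) :
    ∀ (l : List String) (bd : PySem.Dict String (List String)),
      ((l.foldl (fun bd m' => bd.insert m' (bd.getD m' [] ++ [hour])) bd).contains m)
        = (bd.contains m || decide (m ∈ l)) := by
  intro l
  induction l with
  | nil => intro bd; simp
  | cons a t ih =>
    intro bd
    simp only [List.foldl_cons, ih, PySem.Dict.contains_insert]
    by_cases hma : m = a <;> by_cases hmt : m ∈ t <;> simp [hma, hmt]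

theorem byday_getD (m : String) :
    ∀ (hours : List (String × List String)) (bd : PySem.Dict String (List String)),
      ((hours.foldl (fun bd hc =>
          (PySem.List.dedup hc.2).foldl
            (fun bd m' => bd.insert m' (bd.getD m' [] ++ [hc.1])) bd) bd).getD m [])
        = bd.getD m [] ++ pvFilt m hours := by
  intro hours
  induction hours with
  | nil => intro bd; simp [pvFilt]
  | cons hc t ih =>
    intro bd
    simp only [List.foldl_cons, ih, pvFilt_cons,
      cell_getD hc.1 m (PySem.List.dedup hc.2) bd (PySem.List.nodup_dedup hc.2),
      PySem.List.mem_dedup]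
    by_cases h : m ∈ hc.2 <;> simp [h]

theorem byday_contains (m : String) :
    ∀ (hours : List (String × List String)) (bd : PySem.Dict String (List String)),
      ((hours.foldl (fun bd hc =>
          (PySem.List.dedup hc.2).foldl
            (fun bd m' => bd.insert m' (bd.getD m' [] ++ [hc.1])) bd) bd).contains m)
        = (bd.contains m || !(pvFilt m hours).isEmpty) := by
  intro hours
  induction hours with
  | nil => intro bd; simp [pvFilt]
  | cons hc t ih =>
    intro bd
    simp only [List.foldl_cons, ih, pvFilt_cons,
      cell_contains hc.1 m (PySem.List.dedup hc.2) bd, PySem.List.mem_dedup]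
    by_cases h : m ∈ hc.2 <;> simp [h]

theorem newInner_eq (schedule : List (String × List (String × List String))) (m : String)
    (inner : List (String × List String)) :
    pvNewInner (pvBuckets schedule) m inner
      = pvPerMaster schedule m (PySem.Dict.mk inner) := by
  unfold pvNewInner pvBuckets pvPerMaster
  rw [List.foldl_map]
  apply PySem.List.foldl_congr_mem
  intro acc x _
  rw [byday_contains, byday_getD, PySem.Dict.contains_empty, PySem.Dict.getD_empty]
  by_cases h : pvFilt m x.2 = [] <;> simp [h]

theorem alt_eq (masters schedule : List (String × List (String × List String)))
    (hm : (masters.map Prod.fst).Nodup) :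
    get_masters_hours_alt masters schedule
      = masters.map (fun q => (q.1, (pvPerMaster schedule q.1 (PySem.Dict.mk q.2)).items)) := by
  unfold get_masters_hours_alt
  rw [PySem.Dict.items_foldl_insert_fresh masters Prod.fst
    (fun p => (pvNewInner (pvBuckets schedule) p.1 p.2).items) PySem.Dict.empty
    (fun a _ => PySem.Dict.contains_empty _) hm]
  simp only [newInner_eq]
  rfl

-- ---- A side ----

theorem modify_insert_collapse (md : PySem.Dict String (PySem.Dict String (List String)))
    (m day : String) (a b : List String) :
    (md.modify m PySem.Dict.empty (fun i => i.insert day a)).modify m PySem.Dict.empty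
        (fun i => i.insert day b)
      = md.modify m PySem.Dict.empty (fun i => i.insert day b) := by
  have hmod : ∀ (d : PySem.Dict String (PySem.Dict String (List String))) (k : String)
      (f : PySem.Dict String (List String) → PySem.Dict String (List String)),
      d.modify k PySem.Dict.empty f = d.insert k (f (d.getD k PySem.Dict.empty)) := fun _ _ _ => rfl
  rw [hmod, hmod, hmod, PySem.Dict.getD_insert_self, PySem.Dict.insert_insert_self,
    PySem.Dict.insert_insert_self]

theorem dayfold (cond : String × List String → Bool) (day m : String) :
    ∀ (l : List (String × List String)) (lst : List String)
      (md : PySem.Dict String (PySem.Dict String (List String))),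
      (l.foldl (fun st hc =>
          if cond hc then
            (st.1 ++ [hc.1],
             st.2.modify m PySem.Dict.empty (fun inner => inner.insert day (st.1 ++ [hc.1])))
          else st) (lst, md))
        = (lst ++ (l.filter cond).map Prod.fst,
           if (l.filter cond).map Prod.fst = [] then md
           else md.modify m PySem.Dict.empty
             (fun inner => inner.insert day (lst ++ (l.filter cond).map Prod.fst))) := by
  intro l
  induction l with
  | nil => intro lst md; simp
  | cons hc t ih =>
    intro lst md
    rw [List.foldl_cons]
    by_cases hcnd : cond hc = true
    · rw [if_pos hcnd, ih (lst ++ [hc.1])]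
      rw [List.filter_cons_of_pos hcnd]
      simp only [List.map_cons, List.append_assoc, List.singleton_append]
      by_cases ht : (List.filter cond t).map Prod.fst = []
      · simp [ht]
      · rw [if_neg ht, if_neg (by simp), modify_insert_collapse]
    · rw [if_neg hcnd, ih lst, List.filter_cons_of_neg (by simpa using hcnd)]

theorem items_modify {V : Type} (d : PySem.Dict String V) (m : String) (d0 : V) (f : V → V)
    (hnd : d.keys.Nodup) (hm : m ∈ d.keys) :
    (d.modify m d0 f).items = d.items.map (fun p => if p.1 = m then (p.1, f p.2) else p) := by
  have hmod : d.modify m d0 f = d.insert m (f (d.getD m d0)) := rfl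
  rw [hmod, PySem.Dict.items_insert_of_contains d _ ((PySem.Dict.contains_iff_mem_keys d m).mpr hm)]
  apply List.map_congr_left
  intro p hp
  by_cases h : p.1 = m
  · have hv : d.getD m d0 = p.2 := by
      have : (m, p.2) ∈ d.items := by rwa [← h, Prod.mk.eta]
      exact PySem.Dict.getD_of_mem_items d this hnd d0
    simp [h, hv]
  · simp [h]

theorem clean_fold_items (schedule : List (String × List (String × List String))) (m : String) :
    ∀ (md : PySem.Dict String (PySem.Dict String (List String))),
      md.keys.Nodup → m ∈ md.keys →
      (schedule.foldl (fun md q =>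
          if pvFilt m q.2 = [] then md
          else md.modify m PySem.Dict.empty (fun i => i.insert q.1 (pvFilt m q.2))) md).items
        = md.items.map (fun p => if p.1 = m then (p.1, pvPerMaster schedule m p.2) else p) := by
  induction schedule with
  | nil =>
    intro md _ _
    simp only [List.foldl_nil, pvPerMaster]
    have : (fun p : String × PySem.Dict String (List String) =>
        if p.1 = m then (p.1, p.2) else p) = id := by
      funext p
      by_cases h : p.1 = m
      · rw [if_pos h]; rfl
      · rw [if_neg h]; rfl
    rw [this, List.map_id]
  | cons q t ih =>
    intro md hnd hm
    rw [List.foldl_cons]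
    by_cases hL : pvFilt m q.2 = []
    · rw [if_pos hL, ih md hnd hm]
      apply List.map_congr_left
      intro p _
      by_cases h : p.1 = m <;> simp [h, pvPerMaster, hL]
    · rw [if_neg hL]
      have hcont : md.contains m = true := (PySem.Dict.contains_iff_mem_keys md m).mpr hm
      have hmod : md.modify m PySem.Dict.empty (fun i => i.insert q.1 (pvFilt m q.2))
          = md.insert m ((md.getD m PySem.Dict.empty).insert q.1 (pvFilt m q.2)) := rfl
      have hkeys : (md.modify m PySem.Dict.empty (fun i => i.insert q.1 (pvFilt m q.2))).keys = md.keys := by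
        rw [hmod]; exact PySem.Dict.keys_insert_of_contains md _ hcont
      rw [ih _ (hkeys ▸ hnd) (hkeys ▸ hm),
        items_modify md m PySem.Dict.empty _ hnd hm, List.map_map]
      apply List.map_congr_left
      intro p _
      by_cases h : p.1 = m
      · simp only [Function.comp, h, if_pos]
        simp [pvPerMaster, hL]
      · simp [Function.comp, h]

theorem outer_items (schedule : List (String × List (String × List String))) :
    ∀ (ms : List String) (md : PySem.Dict String (PySem.Dict String (List String))),
      ms.Nodup → (∀ m ∈ ms, m ∈ md.keys) → md.keys.Nodup →
      (ms.foldl (fun md m => schedule.foldl (fun md q =>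
          if pvFilt m q.2 = [] then md
          else md.modify m PySem.Dict.empty (fun i => i.insert q.1 (pvFilt m q.2))) md) md).items
        = md.items.map (fun p => if p.1 ∈ ms then (p.1, pvPerMaster schedule p.1 p.2) else p) := by
  intro ms
  induction ms with
  | nil =>
    intro md _ _ _
    simp
  | cons m t ih =>
    intro md hnd hmem hk
    rcases List.nodup_cons.mp hnd with ⟨hmt, hnt⟩
    rw [List.foldl_cons]
    have h1 := clean_fold_items schedule m md hk (hmem m List.mem_cons_self)
    have hkeys1 : (schedule.foldl (fun md q =>
        if pvFilt m q.2 = [] then md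
        else md.modify m PySem.Dict.empty (fun i => i.insert q.1 (pvFilt m q.2))) md).keys = md.keys := by
      show _root_.List.map Prod.fst _ = _root_.List.map Prod.fst md.items
      rw [h1, List.map_map]
      apply List.map_congr_left
      intro p _
      by_cases h : p.1 = m <;> simp [h]
    rw [ih _ hnt (fun x hx => hkeys1 ▸ hmem x (List.mem_cons_of_mem _ hx)) (hkeys1 ▸ hk),
      h1, List.map_map]
    apply List.map_congr_left
    intro p _
    by_cases h : p.1 = m
    · have hpt : p.1 ∉ t := h ▸ hmt
      simp [Function.comp, h, hmt]
    · simp [Function.comp, h, List.mem_cons]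

theorem a_eq (masters schedule : List (String × List (String × List String)))
    (hm : (masters.map Prod.fst).Nodup) (hs : (schedule.map Prod.fst).Nodup)
    (hsi : ∀ p ∈ schedule, (p.2.map Prod.fst).Nodup) :
    get_masters_hours masters schedule
      = masters.map (fun q => (q.1, (pvPerMaster schedule q.1 (PySem.Dict.mk q.2)).items)) := by
  unfold get_masters_hours
  have hk0 : (pvMd0 masters).keys = masters.map Prod.fst := by
    show _root_.List.map Prod.fst (masters.map _) = _
    rw [List.map_map]; rfl
  have hsk : (pvSd schedule).keys = schedule.map Prod.fst := by
    show _root_.List.map Prod.fst (schedule.map _) = _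
    rw [List.map_map]; rfl
  have hsknd : (pvSd schedule).keys.Nodup := by rw [hsk]; exact hs
  have hstep : ∀ (md : PySem.Dict String (PySem.Dict String (List String))) (master : String),
      (pvSd schedule).items.foldl (fun md dh =>
        (dh.2.items.foldl
          (fun (st : List String × PySem.Dict String (PySem.Dict String (List String))) hc =>
            if master ∈ (((pvSd schedule).getD dh.1 PySem.Dict.empty).getD hc.1 []) then
              (st.1 ++ [hc.1],
               st.2.modify master PySem.Dict.empty
                 (fun inner => inner.insert dh.1 (st.1 ++ [hc.1])))
            else st)
          ([], md)).2) md
      = schedule.foldl (fun md q =>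
          if pvFilt master q.2 = [] then md
          else md.modify master PySem.Dict.empty (fun i => i.insert q.1 (pvFilt master q.2))) md := by
    intro md master
    have hit : (pvSd schedule).items = schedule.map (fun p => (p.1, PySem.Dict.mk p.2)) := rfl
    rw [hit, List.foldl_map]
    apply PySem.List.foldl_congr_mem
    intro acc q hq
    have hmem1 : (q.1, PySem.Dict.mk q.2) ∈ (pvSd schedule).items :=
      List.mem_map_of_mem (f := fun p => (p.1, PySem.Dict.mk p.2)) hq
    have h1 : (pvSd schedule).getD q.1 PySem.Dict.empty = PySem.Dict.mk q.2 :=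
      PySem.Dict.getD_of_mem_items _ hmem1 hsknd _
    have hcong : ∀ (st : List String × PySem.Dict String (PySem.Dict String (List String))),
        ∀ hc ∈ q.2,
        (if master ∈ (((pvSd schedule).getD q.1 PySem.Dict.empty).getD hc.1 []) then
           (st.1 ++ [hc.1],
            st.2.modify master PySem.Dict.empty
              (fun inner => inner.insert q.1 (st.1 ++ [hc.1])))
         else st)
        = (if (fun hc : String × List String => decide (master ∈ hc.2)) hc = true then
             (st.1 ++ [hc.1],
              st.2.modify master PySem.Dict.empty
                (fun inner => inner.insert q.1 (st.1 ++ [hc.1])))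
           else st) := by
      intro st hc hhc
      have hknd2 : (PySem.Dict.mk q.2).keys.Nodup := by
        show (_root_.List.map Prod.fst q.2).Nodup
        exact hsi q hq
      have h2 : (PySem.Dict.mk q.2).getD hc.1 [] = hc.2 :=
        PySem.Dict.getD_of_mem_items _ (by rw [Prod.mk.eta]; exact hhc) hknd2 []
      rw [h1, h2]
      simp only [decide_eq_true_eq]
    show ((PySem.Dict.mk q.2).items.foldl _ ([], acc)).2 = _
    rw [show (PySem.Dict.mk q.2).items = q.2 from rfl,
      PySem.List.foldl_congr_mem q.2 _ _ ([], acc) hcong,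
      dayfold (fun hc : String × List String => decide (master ∈ hc.2)) q.1 master q.2 [] acc]
    rfl
  rw [PySem.List.foldl_congr_mem (pvMd0 masters).keys _ _ (pvMd0 masters)
      (fun acc x _ => hstep acc x),
    hk0,
    outer_items schedule (masters.map Prod.fst) (pvMd0 masters) hm
      (fun x hx => hk0 ▸ hx) (hk0 ▸ hm),
    show (pvMd0 masters).items = masters.map (fun p => (p.1, PySem.Dict.mk p.2)) from rfl,
    List.map_map, List.map_map]
  apply List.map_congr_left
  intro q hq
  have : q.1 ∈ masters.map Prod.fst := List.mem_map_of_mem hq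
  simp [Function.comp, this]

-- ===== VERDICT (by name: the statement is the Claim_ definition above) =====
theorem get_masters_hours_spec : Claim_equal_get_masters_hours := by
  intro masters schedule _hdom hpre
  unfold Spec_get_masters_hours
  rw [a_eq masters schedule hpre.1 hpre.2.1 hpre.2.2,
      alt_eq masters schedule hpre.1]
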